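-- pv_equiv track=rewrite | github.com/fostersarah/MML-Assignment2 | Assignment2/main.py | removeUserHandel
-- ===== SOURCE A (Python) =====
-- def removeUserHandel(message):
--     newString = ""
--     atHandel = False
--     for count in range(len(message)):
--         if (message[count] == '@'):
--             atHandel = True
--         if (atHandel == False):
--             newString = newString + message[count]
--         if (message[count] == ' '):
--             atHandel = False
--     return newString
-- ===== SOURCE B (Python) =====
-- def removeUserHandel(message):
--     out = []
--     i = 0
--     n = len(message)
--     while i < n:
--         c = message[i]
--         if c == '@':
--             j = message.find(' ', i)
--             i = n if j < 0 else j + 1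
--         else:
--             out.append(c)
--             i += 1
--     return ''.join(out)
-- ===== Notes on version B (the rewrite author's own statement) =====
-- stated objective: alternative
-- what changed: Replaces the per-character boolean-flag scan by a skip-ahead scan: on '@' jump directly past the next space with str.find, collecting kept characters in a list joined once.
import Mathlib
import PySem

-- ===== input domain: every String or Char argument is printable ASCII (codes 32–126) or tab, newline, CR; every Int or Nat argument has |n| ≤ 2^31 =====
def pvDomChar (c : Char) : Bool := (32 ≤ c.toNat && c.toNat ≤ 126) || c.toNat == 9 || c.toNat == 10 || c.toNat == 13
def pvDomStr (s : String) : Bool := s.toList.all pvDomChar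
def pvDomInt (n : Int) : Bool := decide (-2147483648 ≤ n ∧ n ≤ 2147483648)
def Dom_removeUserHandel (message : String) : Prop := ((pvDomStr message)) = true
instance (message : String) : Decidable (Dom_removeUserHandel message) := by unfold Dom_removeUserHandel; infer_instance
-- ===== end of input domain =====

-- B drops '@'-handles by jumping past the next space (str.find) instead of A's
-- per-character flag scan; objective: alternative (same cost, different traversal).

-- ===== PORT A =====
-- one step of A's for-loop body over state (newString, atHandel)
def stepA (st : List Char × Bool) (c : Char) : List Char × Bool :=
  let at1 := if c = '@' then true else st.2
  let s1 := if at1 = false then st.1 ++ [c] else st.1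
  let at2 := if c = ' ' then false else at1
  (s1, at2)

def removeUserHandel (message : String) : String :=
  String.ofList (message.toList.foldl stepA ([], false)).1

-- ===== PORT B =====
-- B's while loop: the '@' branch sets i past the first space at/after i
-- (message.find(' ', i)), i.e. drops the non-space run and one space; the
-- other branch appends the character to out and advances by one.
def altGo (out : List Char) : List Char → List Char
  | [] => out
  | c :: rest =>
    if c = '@' then altGo out ((rest.dropWhile (· ≠ ' ')).drop 1)
    else altGo (out ++ [c]) rest
termination_by l => l.length
decreasing_by
  · have h : ((rest.dropWhile (· ≠ ' ')).drop 1).length ≤ rest.length :=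
      le_trans (by rw [List.length_drop]; exact Nat.sub_le _ _) (List.length_dropWhile_le _ _)
    simp only [List.length_cons]; omega
  · simp

def removeUserHandel_alt (message : String) : String :=
  String.ofList (altGo [] message.toList)

-- ===== PRECONDITION & SPEC =====
def Spec_removeUserHandel (message : String) (out : String) : Prop := out = removeUserHandel_alt message
instance (message : String) (out : String) : Decidable (Spec_removeUserHandel message out) := by unfold Spec_removeUserHandel; infer_instance

-- ===== CLAIM (what is proved, stated in full; the proofs are below) =====
def Claim_equal_removeUserHandel : Prop := ∀ (message : String), Dom_removeUserHandel message → Spec_removeUserHandel message (removeUserHandel message)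

-- ===== LEMMAS AND PROOFS =====

-- Combined invariant, by strong induction on the length of the remaining input:
-- with the flag false A's fold builds exactly what altGo builds; with the flag
-- true A's fold skips to just past the next space, i.e. altGo on the dropped tail.
theorem fold_altGo (n : ℕ) : ∀ (l : List Char), l.length ≤ n → ∀ (acc : List Char),
    (l.foldl stepA (acc, false)).1 = altGo acc l ∧
    (l.foldl stepA (acc, true)).1 = altGo acc ((l.dropWhile (· ≠ ' ')).drop 1) := by
  induction n with
  | zero =>
    intro l hl acc
    have : l = [] := List.eq_nil_of_length_eq_zero (Nat.le_zero.mp hl)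
    subst this
    simp [altGo]
  | succ n ih =>
    intro l hl acc
    cases l with
    | nil => simp [altGo]
    | cons c rest =>
      have hrest : rest.length ≤ n := by simpa using Nat.succ_le_succ_iff.mp hl
      constructor
      · by_cases hc : c = '@'
        · subst hc
          have := (ih rest hrest acc).2
          simp [List.foldl_cons, stepA, altGo]
          simpa [stepA] using this
        · have h := (ih rest hrest (acc ++ [c])).1
          by_cases hs : c = ' '
          · subst hs; simpa [List.foldl_cons, stepA, hc, altGo] using h
          · simpa [List.foldl_cons, stepA, hc, hs, altGo] using h
      · by_cases hs : c = ' '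
        · subst hs
          have := (ih rest hrest acc).1
          simp [List.foldl_cons, stepA, List.dropWhile]
          simpa [stepA] using this
        · have := (ih rest hrest acc).2
          by_cases hc : c = '@' <;>
            simp [List.foldl_cons, stepA, hc, hs, List.dropWhile, this]

theorem removeUserHandel_eq_alt (message : String) :
    removeUserHandel message = removeUserHandel_alt message := by
  unfold removeUserHandel removeUserHandel_alt
  rw [(fold_altGo message.toList.length message.toList le_rfl []).1]

-- ===== VERDICT (by name: the statement is the Claim_ definition above) =====
theorem removeUserHandel_spec : Claim_equal_removeUserHandel := by
  intro message _
  unfold Spec_removeUserHandel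
  exact removeUserHandel_eq_alt message
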